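-- pv_equiv track=rewrite | github.com/kccastrosfu/Starting-my-developer-journey | assignment4.2e.py | digits_plus
-- ===== SOURCE A (Python) =====
-- def digits_plus(num):
--     count = 0
--     sum_count  = ""
--     while (count < num):
--         count += 1
--         sum_count = sum_count + str(count)
--     sum_count = "+".join(str(sum_count))
--     if count == 0:
--         return ("0+" + sum_count)
--     else:
--         return ("0+" + sum_count  + "+")
-- ===== SOURCE B (Python) =====
-- def digits_plus(num):
--     result = "0+"
--     for i in range(1, num + 1):
--         for ch in str(i):
--             result += ch + "+"
--     return result
-- ===== Notes on version B (the rewrite author's own statement) =====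
-- stated objective: simpler
-- what changed: A's three phases (build a concatenated digit string in a while loop, '+'.join its characters, then a conditional trailing '+') are collapsed into one direct pass that emits each digit followed by '+', with no join and no final branch.
import Mathlib
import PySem

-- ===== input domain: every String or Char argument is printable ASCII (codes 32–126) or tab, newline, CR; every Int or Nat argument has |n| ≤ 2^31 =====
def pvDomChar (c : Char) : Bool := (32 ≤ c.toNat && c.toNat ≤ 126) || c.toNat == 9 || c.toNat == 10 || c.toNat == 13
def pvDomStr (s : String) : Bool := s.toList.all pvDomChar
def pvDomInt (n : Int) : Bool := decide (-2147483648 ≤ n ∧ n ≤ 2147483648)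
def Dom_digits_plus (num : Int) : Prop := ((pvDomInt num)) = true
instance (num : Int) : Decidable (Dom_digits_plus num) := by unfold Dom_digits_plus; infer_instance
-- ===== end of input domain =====

-- B collapses A's build-then-join-then-conditional into one pass emitting each digit followed by '+'; simpler, same cost.


-- ===== PORT A =====
-- 'while count < num: count += 1; sum_count += str(count)' — returns final (count, sum_count)
def digitsPlusLoopA (num count : Int) (sum_count : List Char) : Int × List Char :=
  if count < num then
    digitsPlusLoopA num (count + 1) (sum_count ++ PySem.Int.toChars (count + 1))
  else (count, sum_count)
  termination_by (num - count).toNat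
  decreasing_by omega

def digits_plus (num : Int) : String :=
  let r := digitsPlusLoopA num 0 []
  -- "+".join(str(sum_count)) iterates the characters of sum_count
  let joined := PySem.Chars.join ['+'] (r.2.map (fun c => [c]))
  if r.1 = 0 then String.ofList (['0', '+'] ++ joined)
  else String.ofList (['0', '+'] ++ joined ++ ['+'])

-- ===== PORT B =====
def digits_plus_alt (num : Int) : String :=
  String.ofList <|
    (PySem.List.pyRange 1 (num + 1) 1).foldl
      (fun acc i => (PySem.Int.toChars i).foldl (fun acc ch => acc ++ [ch, '+']) acc)
      ['0', '+']

-- ===== PRECONDITION & SPEC =====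
def Spec_digits_plus (num : Int) (out : String) : Prop := out = digits_plus_alt num
instance (num : Int) (out : String) : Decidable (Spec_digits_plus num out) := by unfold Spec_digits_plus; infer_instance

-- ===== CLAIM (what is proved, stated in full; the proofs are below) =====
def Claim_equal_digits_plus : Prop := ∀ (num : Int), Dom_digits_plus num → Spec_digits_plus num (digits_plus num)

-- ===== LEMMAS AND PROOFS =====

-- A's while loop produces num and the concatenated digit characters of count+1 .. num.
theorem digitsPlusLoopA_eq (num : Int) : ∀ (count : Int) (s : List Char), count ≤ num →
    digitsPlusLoopA num count s
      = (num, s ++ (PySem.List.pyRange (count + 1) (num + 1) 1).flatMap PySem.Int.toChars) := by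
  intro count s hle
  generalize hk : (num - count).toNat = k
  induction k generalizing count s with
  | zero =>
    have hcn : count = num := by omega
    subst hcn
    rw [digitsPlusLoopA]
    simp [PySem.List.pyRange_one_eq_nil (le_refl (count + 1))]
  | succ k ih =>
    have hlt : count < num := by omega
    rw [digitsPlusLoopA, if_pos hlt,
        ih (count + 1) _ (by omega) (by omega),
        PySem.List.pyRange_one_cons (by omega : count + 1 < num + 1)]
    simp

-- when the loop never runs (num ≤ 0) it returns (0, [])
theorem digitsPlusLoopA_nonpos (num : Int) (h : num ≤ 0) :
    digitsPlusLoopA num 0 [] = (0, []) := by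
  rw [digitsPlusLoopA]; simp [not_lt.mpr h]

-- '+'.join of the singletons of a nonempty char list, followed by '+', interleaves '+' after every char
theorem join_singletons_plus (D : List Char) (h : D ≠ []) :
    PySem.Chars.join ['+'] (D.map (fun c => [c])) ++ ['+']
      = D.flatMap (fun c => [c, '+']) := by
  induction D with
  | nil => simp at h
  | cons c t ih =>
    cases t with
    | nil => simp [PySem.Chars.join_singleton]
    | cons d t' =>
      rw [List.map_cons, List.map_cons, PySem.Chars.join_cons_cons,
          List.flatMap_cons, ← ih (by simp)]
      simp

-- B's nested folds append one flattened digit/plus block per number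
theorem alt_foldl_eq (l : List Int) (init : List Char) :
    l.foldl (fun acc i => (PySem.Int.toChars i).foldl (fun acc ch => acc ++ [ch, '+']) acc) init
      = init ++ l.flatMap (fun i => (PySem.Int.toChars i).flatMap (fun ch => [ch, '+'])) := by
  have h1 : (fun (acc : List Char) (i : Int) =>
        (PySem.Int.toChars i).foldl (fun acc ch => acc ++ [ch, '+']) acc)
      = fun acc i => acc ++ (PySem.Int.toChars i).flatMap (fun ch => [ch, '+']) := by
    funext acc i
    exact PySem.List.foldl_append_eq_flatMap _ _ _
  rw [h1, PySem.List.foldl_append_eq_flatMap]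

theorem digits_plus_eq_alt (num : Int) : digits_plus num = digits_plus_alt num := by
  unfold digits_plus digits_plus_alt
  by_cases h : num ≤ 0
  · rw [digitsPlusLoopA_nonpos num h,
        PySem.List.pyRange_one_eq_nil (by omega : num + 1 ≤ 1)]
    decide
  · replace h : 0 < num := by omega
    rw [digitsPlusLoopA_eq num 0 [] (by omega), alt_foldl_eq]
    simp only [zero_add, List.nil_append]
    have hDne : (PySem.List.pyRange 1 (num + 1) 1).flatMap PySem.Int.toChars ≠ [] := by
      rw [PySem.List.pyRange_one_cons (by omega : (1:Int) < num + 1)]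
      have h2 : PySem.Int.toChars 1 = ['1'] := by decide
      simp [h2]
    rw [if_neg (by omega : ¬ num = 0), ← List.flatMap_assoc,
        ← join_singletons_plus _ hDne]
    simp

-- ===== VERDICT (by name: the statement is the Claim_ definition above) =====
theorem digits_plus_spec : Claim_equal_digits_plus := by
  intro num _
  unfold Spec_digits_plus
  exact digits_plus_eq_alt num
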